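-- pv_equiv track=rewrite | github.com/roby238/algo_study | 이수빈/BOJ1796.py | solve
-- ===== SOURCE A (Python) =====
-- def dist(a, b, c, d):
--     return 0 if c == -1 or d == -1 else abs(a - c) + abs(c - d) + abs(d - b)
--
-- def solve(S):
--     s = len(S)
--     cnt = [[-1] * s for _ in range(26)]
--     alpha_first = [50] * 26
--     alpha_last = [-1] * 26
--     ch = [False] * 26
--
--     for i, char in enumerate(S):
--         index = ord(char) - ord('a')
--         ch[index] = True
--         alpha_first[index] = min(alpha_first[index], i)
--         alpha_last[index] = max(alpha_last[index], i)
--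
--     def dp(alpha, j):
--         if alpha == 26:
--             return 0
--         if cnt[alpha][j] != -1:
--             return cnt[alpha][j]
--
--         count = float('inf')
--         j_first, j_last = alpha_first[alpha], alpha_last[alpha]
--
--         if ch[alpha]:
--             for i in range(s):
--                 count = min(count, dp(alpha + 1, i) + min(dist(j, i, j_first, j_last), dist(j, i, j_last, j_first)))
--         else:
--             count = dp(alpha + 1, j)
--
--         cnt[alpha][j] = count
--         return count
--
--     return dp(0, 0) + s #문자열 길이만큼 엔터 클릭하는 횟수 추가
-- ===== SOURCE B (Python) =====
-- def solve(S):
--     s = len(S)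
--     # same preprocessing as the original (first is capped at 50, the problem's
--     # positional bound), then an O(26*s) DP using separability of |.|
--     first = [50] * 26
--     last = [-1] * 26
--     for i, c in enumerate(S):
--         k = ord(c) - ord('a')
--         first[k] = min(first[k], i)
--         last[k] = max(last[k], i)
--
--     g = [0] * s  # dp row for the level past 'z'
--     for k in range(25, -1, -1):
--         f, l = first[k], last[k]
--         if l == -1:
--             continue
--         # Manhattan cost separates: only h(l) = min_i g[i]+|l-i| and
--         # h(f) = min_i g[i]+|f-i| are needed, each one linear scan.
--         hl = min(g[i] + abs(l - i) for i in range(s))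
--         hf = min(g[i] + abs(f - i) for i in range(s))
--         base = l - f
--         g = [base + min(abs(j - f) + hl, abs(j - l) + hf) for j in range(s)]
--     return g[0] + s
-- ===== Notes on version B (the rewrite author's own statement) =====
-- stated objective: faster
-- what changed: A computes each DP level by a quadratic min over all position pairs via memoised top-down recursion; B keeps A's preprocessing pass but exploits that the Manhattan cost separates, so each level needs only the two values min_i(g[i]+|last-i|) and min_i(g[i]+|first-i|), computed in O(s) per present letter.
import Mathlib
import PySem

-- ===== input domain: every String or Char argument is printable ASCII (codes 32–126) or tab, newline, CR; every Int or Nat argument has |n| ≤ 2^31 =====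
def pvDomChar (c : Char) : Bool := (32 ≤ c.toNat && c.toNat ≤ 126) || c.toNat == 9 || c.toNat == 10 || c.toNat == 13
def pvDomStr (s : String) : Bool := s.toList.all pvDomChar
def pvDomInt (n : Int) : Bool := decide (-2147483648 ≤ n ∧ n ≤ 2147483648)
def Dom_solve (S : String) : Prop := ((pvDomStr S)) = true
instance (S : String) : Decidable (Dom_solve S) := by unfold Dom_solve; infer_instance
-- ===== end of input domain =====

-- B keeps A's preprocessing but replaces A's quadratic-per-letter DP transition by two
-- linear scans per letter (the Manhattan travel cost separates); measured faster.

-- ===== PORT A =====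
-- A's memoised top-down dp(alpha, j) depends only on row alpha+1; it is rendered
-- level-by-level (alpha = 25 down to 0), same recurrence, same values.
def distA (a b c d : Int) : Int := if c = -1 ∨ d = -1 then 0 else |a - c| + |c - d| + |d - b|

-- first pass of A: ch / alpha_first / alpha_last (Python list writes at ord(c)-97,
-- which wraps for negative indices: pySetD/pyGetD are exact here)
def scanA (es : List (Int × Char)) (st : List Bool × List Int × List Int) :
    List Bool × List Int × List Int :=
  es.foldl (fun st ic =>
    let idx : Int := (ic.2.toNat : Int) - 97
    (PySem.List.pySetD st.1 idx true,
     PySem.List.pySetD st.2.1 idx (min (PySem.List.pyGetD st.2.1 idx 0) ic.1),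
     PySem.List.pySetD st.2.2 idx (max (PySem.List.pyGetD st.2.2 idx 0) ic.1))) st

-- count = min(count, x) with count starting at float('inf'): none = inf
def pyMinO (a : Option Int) (x : Int) : Option Int :=
  some (match a with | none => x | some m => min m x)

-- the inner 'for i in range(s)' of dp when ch[alpha] is true
def innerA (s : Nat) (f l : Int) (prev : List Int) (j : Int) : Int :=
  ((List.range s).foldl
    (fun acc (i : Nat) => pyMinO acc (PySem.List.pyGetD prev (i : Int) 0 +
      min (distA j (i : Int) f l) (distA j (i : Int) l f))) none).getD 0

def stepA (s : Nat) (chk : Bool) (f l : Int) (prev : List Int) : List Int :=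
  if chk then (List.range s).map (fun j => innerA s f l prev (j : Int)) else prev

-- levelsA m = the memo row dp(26-m, ·); levelsA 26 = dp(0, ·)
def levelsA (s : Nat) (ch : List Bool) (fa la : List Int) : Nat → List Int
  | 0 => List.replicate s 0
  | m + 1 => stepA s (ch.getD (25 - m) false) (fa.getD (25 - m) 0) (la.getD (25 - m) 0)
      (levelsA s ch fa la m)

def solve (S : String) : Int :=
  let cs := S.toList
  let s := cs.length
  let st := scanA (PySem.List.enumerate cs 0)
    (List.replicate 26 false, List.replicate 26 50, List.replicate 26 (-1))
  (levelsA s st.1 st.2.1 st.2.2 26).getD 0 0 + (s : Int)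

-- ===== PORT B =====
-- first pass of B: same min/max updates (same Python negative-index write semantics)
def scanB (es : List (Int × Char)) (st : List Int × List Int) : List Int × List Int :=
  es.foldl (fun st ic =>
    let idx : Int := (ic.2.toNat : Int) - 97
    (PySem.List.pySetD st.1 idx (min (PySem.List.pyGetD st.1 idx 0) ic.1),
     PySem.List.pySetD st.2 idx (max (PySem.List.pyGetD st.2 idx 0) ic.1))) st

-- min() over a nonempty generator; [] is unreachable under Pre_ (s ≥ 1)
def pyMinL (xs : List Int) : Int := match xs with | [] => 0 | x :: t => t.foldl min x

def stepB (s : Nat) (f l : Int) (g : List Int) : List Int :=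
  if l = -1 then g else
    let hl := pyMinL ((List.range s).map fun i => g.getD i 0 + |l - (i : Int)|)
    let hf := pyMinL ((List.range s).map fun i => g.getD i 0 + |f - (i : Int)|)
    let base := l - f
    (List.range s).map fun j => base + min (|(j : Int) - f| + hl) (|(j : Int) - l| + hf)

-- levelsB m = B's row g after processing letters 25 down to 26-m
def levelsB (s : Nat) (fb lb : List Int) : Nat → List Int
  | 0 => List.replicate s 0
  | m + 1 => stepB s (fb.getD (25 - m) 0) (lb.getD (25 - m) 0) (levelsB s fb lb m)

def solve_alt (S : String) : Int :=
  let cs := S.toList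
  let s := cs.length
  let st := scanB (PySem.List.enumerate cs 0) (List.replicate 26 50, List.replicate 26 (-1))
  (levelsB s st.1 st.2 26).getD 0 0 + (s : Int)

-- ===== PRECONDITION & SPEC =====
-- Pre_ excludes exactly the inputs where A raises IndexError: the empty string
-- (cnt[0][0] on empty rows) and characters with code outside 71..122 (list index
-- ord(c)-97 outside Python's wrap range [-26, 25] on the 26-element tables).
def Pre_solve (S : String) : Prop :=
  S.toList ≠ [] ∧ (S.toList.all (fun c => 71 ≤ c.toNat && c.toNat ≤ 122) = true)
instance (S : String) : Decidable (Pre_solve S) := by unfold Pre_solve; infer_instance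

def pvWitness_solve : String := "abc"

def Spec_solve (S : String) (out : Int) : Prop := out = solve_alt S
instance (S : String) (out : Int) : Decidable (Spec_solve S out) := by unfold Spec_solve; infer_instance

-- ===== CLAIM (what is proved, stated in full; the proofs are below) =====
def Claim_equal_solve : Prop := ∀ (S : String), Dom_solve S → Pre_solve S → Spec_solve S (solve S)

-- ===== LEMMAS AND PROOFS =====

-- effective write index of Python's xs[ord(c)-97] on a 26-list, for codes 71..122
def effN (c : Char) : Nat := (c.toNat - 71) % 26

def Adm (c : Char) : Prop := 71 ≤ c.toNat ∧ c.toNat ≤ 122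

-- first index satisfying p (proof-side spec)
def firstIdx (p : Char → Prop) [DecidablePred p] : List Char → Option Nat
  | [] => none
  | c :: t => if p c then some 0 else (firstIdx p t).map (· + 1)

theorem pyIdx_eff (c : Char) (hc : Adm c) :
    PySem.List.pyIdx? 26 ((c.toNat : Int) - 97) = some (effN c) := by
  obtain ⟨h1, h2⟩ := hc
  simp only [PySem.List.pyIdx?, effN]
  split_ifs with ha hb hcnd
  · congr 1; omega
  · omega
  · congr 1; omega
  · omega

theorem pySetD_eff {α : Type} (xs : List α) (c : Char) (v : α)
    (hx : xs.length = 26) (hc : Adm c) :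
    PySem.List.pySetD xs ((c.toNat : Int) - 97) v = xs.set (effN c) v := by
  simp [PySem.List.pySetD, PySem.List.pySet?, hx, pyIdx_eff c hc]

theorem pyGetD_eff {α : Type} (xs : List α) (c : Char) (d : α)
    (hx : xs.length = 26) (hc : Adm c) :
    PySem.List.pyGetD xs ((c.toNat : Int) - 97) d = xs.getD (effN c) d := by
  simp [PySem.List.pyGetD, PySem.List.pyGet?, hx, pyIdx_eff c hc, List.getD]

theorem getD_set' {α : Type} (xs : List α) (n k : Nat) (v : α) (d : α) :
    (xs.set n v).getD k d = if n = k ∧ n < xs.length then v else xs.getD k d := by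
  simp only [List.getD, List.getElem?_set]
  split_ifs with h h1 h2 h3 <;> simp_all <;> omega

theorem effN_lt (c : Char) : effN c < 26 := Nat.mod_lt _ (by norm_num)

-- projection of A's first-pass fold to one alphabet slot k
theorem scanA_proj (es : List (Int × Char)) (st : List Bool × List Int × List Int)
    (hes : ∀ ic ∈ es, Adm ic.2) (h1 : st.1.length = 26) (h2 : st.2.1.length = 26)
    (h3 : st.2.2.length = 26) (k : Nat) :
    (scanA es st).1.length = 26 ∧ (scanA es st).2.1.length = 26 ∧
    (scanA es st).2.2.length = 26 ∧
    ((scanA es st).1.getD k false =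
      es.foldl (fun a ic => if effN ic.2 = k then true else a) (st.1.getD k false)) ∧
    ((scanA es st).2.1.getD k 0 =
      es.foldl (fun a ic => if effN ic.2 = k then min a ic.1 else a) (st.2.1.getD k 0)) ∧
    ((scanA es st).2.2.getD k 0 =
      es.foldl (fun a ic => if effN ic.2 = k then max a ic.1 else a) (st.2.2.getD k 0)) := by
  induction es generalizing st with
  | nil => simp [scanA, h1, h2, h3]
  | cons ic es ih =>
    obtain ⟨i, c⟩ := ic
    have hc : Adm c := hes (i, c) (by simp)
    have hstep : scanA ((i, c) :: es) st =
        scanA es (st.1.set (effN c) true,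
          st.2.1.set (effN c) (min (st.2.1.getD (effN c) 0) i),
          st.2.2.set (effN c) (max (st.2.2.getD (effN c) 0) i)) := by
      simp only [scanA, List.foldl_cons]
      rw [pySetD_eff _ _ _ h1 hc, pyGetD_eff _ _ _ h2 hc, pySetD_eff _ _ _ h2 hc,
        pyGetD_eff _ _ _ h3 hc, pySetD_eff _ _ _ h3 hc]
    rw [hstep]
    have ih' := ih (st.1.set (effN c) true,
          st.2.1.set (effN c) (min (st.2.1.getD (effN c) 0) i),
          st.2.2.set (effN c) (max (st.2.2.getD (effN c) 0) i))
      (fun x hx => hes x (by simp [hx]))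
      (by simp [h1]) (by simp [h2]) (by simp [h3])
    refine ⟨ih'.1, ih'.2.1, ih'.2.2.1, ?_, ?_, ?_⟩
    · rw [ih'.2.2.2.1]
      simp only [List.foldl_cons]
      congr 1
      rw [getD_set']
      by_cases hek : effN c = k
      · subst hek; simp [h1, effN_lt c]
      · simp [hek]
    · rw [ih'.2.2.2.2.1]
      simp only [List.foldl_cons]
      congr 1
      rw [getD_set']
      by_cases hek : effN c = k
      · subst hek; simp [h2, effN_lt c]
      · simp [hek]
    · rw [ih'.2.2.2.2.2]
      simp only [List.foldl_cons]
      congr 1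
      rw [getD_set']
      by_cases hek : effN c = k
      · subst hek; simp [h3, effN_lt c]
      · simp [hek]

-- projection of B's first-pass fold to one alphabet slot k
theorem scanB_proj (es : List (Int × Char)) (st : List Int × List Int)
    (hes : ∀ ic ∈ es, Adm ic.2) (h1 : st.1.length = 26) (h2 : st.2.length = 26) (k : Nat) :
    (scanB es st).1.length = 26 ∧ (scanB es st).2.length = 26 ∧
    ((scanB es st).1.getD k 0 =
      es.foldl (fun a ic => if effN ic.2 = k then min a ic.1 else a) (st.1.getD k 0)) ∧
    ((scanB es st).2.getD k 0 =
      es.foldl (fun a ic => if effN ic.2 = k then max a ic.1 else a) (st.2.getD k 0)) := by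
  induction es generalizing st with
  | nil => simp [scanB, h1, h2]
  | cons ic es ih =>
    obtain ⟨i, c⟩ := ic
    have hc : Adm c := hes (i, c) (by simp)
    have hstep : scanB ((i, c) :: es) st =
        scanB es (st.1.set (effN c) (min (st.1.getD (effN c) 0) i),
          st.2.set (effN c) (max (st.2.getD (effN c) 0) i)) := by
      simp only [scanB, List.foldl_cons]
      rw [pyGetD_eff _ _ _ h1 hc, pySetD_eff _ _ _ h1 hc,
        pyGetD_eff _ _ _ h2 hc, pySetD_eff _ _ _ h2 hc]
    rw [hstep]
    have ih' := ih (st.1.set (effN c) (min (st.1.getD (effN c) 0) i),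
          st.2.set (effN c) (max (st.2.getD (effN c) 0) i))
      (fun x hx => hes x (by simp [hx])) (by simp [h1]) (by simp [h2])
    refine ⟨ih'.1, ih'.2.1, ?_, ?_⟩
    · rw [ih'.2.2.1]
      simp only [List.foldl_cons]
      congr 1
      rw [getD_set']
      by_cases hek : effN c = k
      · subst hek; simp [h1, effN_lt c]
      · simp [hek]
    · rw [ih'.2.2.2]
      simp only [List.foldl_cons]
      congr 1
      rw [getD_set']
      by_cases hek : effN c = k
      · subst hek; simp [h2, effN_lt c]
      · simp [hek]

-- scalar-fold facts over enumerate: ch is "any occurrence"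
theorem chfold_any (k : Nat) (cs : List Char) : ∀ (n : Int) (a : Bool),
    (PySem.List.enumerate cs n).foldl (fun a ic => if effN ic.2 = k then true else a) a
      = (a || cs.any (fun c => effN c == k)) := by
  induction cs with
  | nil => intro n a; simp [PySem.List.enumerate]
  | cons c t ih =>
    intro n a
    rw [PySem.List.enumerate_cons]
    simp only [List.foldl_cons, List.any_cons]
    by_cases h : effN c = k
    · rw [if_pos h, ih (n + 1) true]
      simp [h]
    · rw [if_neg h, ih (n + 1) a]
      rw [show (effN c == k) = false from by simp [h]]
      simp

-- the max fold keeps its seed when no occurrence matches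
theorem maxfold_none (k : Nat) (cs : List Char) : ∀ (n a : Int),
    firstIdx (fun c => effN c = k) cs = none →
    (PySem.List.enumerate cs n).foldl (fun a ic => if effN ic.2 = k then max a ic.1 else a) a = a := by
  induction cs with
  | nil => intro n a _; simp [PySem.List.enumerate]
  | cons c t ih =>
    intro n a hf
    by_cases h : effN c = k
    · simp [firstIdx, h] at hf
    · simp only [firstIdx, if_neg h] at hf
      rw [PySem.List.enumerate_cons]
      simp only [List.foldl_cons, if_neg h]
      exact ih (n + 1) a (by cases hft : firstIdx (fun c => effN c = k) t <;> simp [hft] at hf ⊢)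

-- the max fold's result dominates n + i0 when the first occurrence is at i0
theorem maxfold_ge (k : Nat) (cs : List Char) : ∀ (n a : Int),
    a ≤ (PySem.List.enumerate cs n).foldl (fun a ic => if effN ic.2 = k then max a ic.1 else a) a := by
  induction cs with
  | nil => intro n a; simp [PySem.List.enumerate]
  | cons c t ih =>
    intro n a
    rw [PySem.List.enumerate_cons]
    simp only [List.foldl_cons]
    by_cases h : effN c = k
    · rw [if_pos h]
      exact le_trans (le_max_left a n) (ih (n + 1) (max a n))
    · rw [if_neg h]
      exact ih (n + 1) a

theorem maxfold_ge_first (k : Nat) (cs : List Char) : ∀ (n a : Int) (i0 : Nat),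
    firstIdx (fun c => effN c = k) cs = some i0 →
    n + i0 ≤ (PySem.List.enumerate cs n).foldl
      (fun a ic => if effN ic.2 = k then max a ic.1 else a) a := by
  induction cs with
  | nil => intro n a i0 h; simp [firstIdx] at h
  | cons c t ih =>
    intro n a i0 hf
    rw [PySem.List.enumerate_cons]
    simp only [List.foldl_cons]
    by_cases h : effN c = k
    · simp only [firstIdx, if_pos h] at hf
      obtain rfl : i0 = 0 := by simpa using hf.symm
      rw [if_pos h]
      have := maxfold_ge k t (n + 1) (max a n)
      have h2 : n ≤ max a n := le_max_right a n
      omega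
    · simp only [firstIdx, if_neg h] at hf
      obtain ⟨i1, hi1, rfl⟩ : ∃ i1, firstIdx (fun c => effN c = k) t = some i1 ∧ i0 = i1 + 1 := by
        cases hft : firstIdx (fun c => effN c = k) t with
        | none => rw [hft] at hf; simp at hf
        | some i1 => rw [hft] at hf; simp at hf; exact ⟨i1, rfl, hf.symm⟩
      rw [if_neg h]
      have := ih (n + 1) a i1 hi1
      push_cast at this ⊢
      omega

-- A's running min over increasing indices: absorbed when the accumulator is small
theorem afold_const (k : Nat) (cs : List Char) : ∀ (n a : Int), a ≤ n →
    (PySem.List.enumerate cs n).foldl (fun a ic => if effN ic.2 = k then min a ic.1 else a) a = a := by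
  induction cs with
  | nil => intro n a _; simp [PySem.List.enumerate]
  | cons c t ih =>
    intro n a ha
    rw [PySem.List.enumerate_cons]
    simp only [List.foldl_cons]
    by_cases h : effN c = k
    · rw [if_pos h, min_eq_left ha]
      exact ih (n + 1) a (by omega)
    · rw [if_neg h]
      exact ih (n + 1) a (by omega)

theorem afold_closed (k : Nat) (cs : List Char) : ∀ (n : Int), 0 ≤ n →
    (PySem.List.enumerate cs n).foldl (fun a ic => if effN ic.2 = k then min a ic.1 else a) 50
      = (match firstIdx (fun c => effN c = k) cs with | none => 50 | some i => min 50 (n + i)) := by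
  induction cs with
  | nil => intro n _; simp [PySem.List.enumerate, firstIdx]
  | cons c t ih =>
    intro n hn
    rw [PySem.List.enumerate_cons]
    simp only [List.foldl_cons]
    by_cases h : effN c = k
    · rw [if_pos h, afold_const k t (n + 1) (min 50 n) (by omega)]
      simp only [firstIdx, if_pos h]
      norm_num
    · rw [if_neg h, ih (n + 1) (by omega)]
      simp only [firstIdx, if_neg h]
      cases hft : firstIdx (fun c => effN c = k) t <;> simp [hft]
      congr 1
      push_cast
      ring

theorem any_iff_firstIdx (k : Nat) (cs : List Char) :
    cs.any (fun c => effN c == k) = (firstIdx (fun c => effN c = k) cs).isSome := by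
  induction cs with
  | nil => simp [firstIdx]
  | cons c t ih =>
    simp only [List.any_cons, firstIdx]
    by_cases h : effN c = k <;> simp [h, ih]

-- bridging the inf-min fold to pyMinL
theorem optfold_some (xs : List Int) : ∀ (a : Int), xs.foldl pyMinO (some a) = some (xs.foldl min a) := by
  induction xs with
  | nil => intro a; rfl
  | cons x t ih => intro a; simp only [List.foldl_cons, pyMinO]; exact ih (min a x)

theorem pyMinL_cons (x : Int) (t : List Int) : pyMinL (x :: t) = t.foldl min x := rfl

theorem fold_pyMinO_eq (F : Nat → Int) (n : Nat) :
    (List.range (n + 1)).foldl (fun acc i => pyMinO acc (F i)) none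
      = some (pyMinL ((List.range (n + 1)).map F)) := by
  rw [← List.foldl_map, List.range_succ_eq_map]
  simp only [List.map_cons, List.foldl_cons]
  rw [show pyMinO none (F 0) = some (F 0) from rfl, optfold_some, pyMinL_cons]

theorem foldl_min_add (t : List Nat) : ∀ (C a : Int) (G : Nat → Int),
    (t.map (fun i => C + G i)).foldl min (C + a) = C + (t.map G).foldl min a := by
  induction t with
  | nil => intro C a G; simp
  | cons x t ih =>
    intro C a G
    simp only [List.map_cons, List.foldl_cons]
    rw [min_add_add_left, ih]

theorem foldl_min_min (t : List Nat) : ∀ (a b : Int) (P Q : Nat → Int),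
    (t.map (fun i => min (P i) (Q i))).foldl min (min a b)
      = min ((t.map P).foldl min a) ((t.map Q).foldl min b) := by
  induction t with
  | nil => intro a b P Q; simp
  | cons x t ih =>
    intro a b P Q
    simp only [List.map_cons, List.foldl_cons]
    rw [min_min_min_comm, ih]

theorem pyMinL_map_add (C : Int) (G : Nat → Int) (n : Nat) :
    pyMinL ((List.range (n + 1)).map (fun i => C + G i))
      = C + pyMinL ((List.range (n + 1)).map G) := by
  rw [List.range_succ_eq_map]
  simp only [List.map_cons, pyMinL_cons]
  rw [List.map_map, List.map_map]
  exact foldl_min_add _ C (G 0) _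

theorem pyMinL_map_min (P Q : Nat → Int) (n : Nat) :
    pyMinL ((List.range (n + 1)).map (fun i => min (P i) (Q i)))
      = min (pyMinL ((List.range (n + 1)).map P)) (pyMinL ((List.range (n + 1)).map Q)) := by
  rw [List.range_succ_eq_map]
  simp only [List.map_cons, pyMinL_cons]
  rw [List.map_map, List.map_map, List.map_map]
  exact foldl_min_min _ (P 0) (Q 0) _ _

theorem min_shift (p q d h1 h2 : Int) :
    min ((p + d) + h1) ((q + d) + h2) = d + min (p + h1) (q + h2) := by
  simp only [Int.min_def]
  split_ifs <;> omega

-- one DP level: A's quadratic transition equals B's separable one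
theorem step_eq (s : Nat) (hs : 1 ≤ s) (f l : Int) (h0 : 0 ≤ f) (hfl : f ≤ l) (g : List Int) :
    stepA s true f l g = stepB s f l g := by
  obtain ⟨n, rfl⟩ : ∃ n, s = n + 1 := ⟨s - 1, by omega⟩
  unfold stepA stepB
  rw [if_pos rfl, if_neg (show ¬ l = -1 by omega)]
  apply List.map_congr_left
  intro j hj
  have hF : ∀ i : Nat, PySem.List.pyGetD g (i : Int) 0 +
      min (distA (j : Int) (i : Int) f l) (distA (j : Int) (i : Int) l f)
      = min ((|(j : Int) - f| + (l - f)) + (g.getD i 0 + |l - (i : Int)|))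
          ((|(j : Int) - l| + (l - f)) + (g.getD i 0 + |f - (i : Int)|)) := by
    intro i
    rw [PySem.List.pyGetD_natCast]
    have hg : ¬ (f = -1 ∨ l = -1) := by omega
    have hg' : ¬ (l = -1 ∨ f = -1) := by omega
    simp only [distA, if_neg hg, if_neg hg']
    have hab : |f - l| = l - f := by rw [abs_of_nonpos (by omega)]; ring
    have hab' : |l - f| = l - f := by rw [abs_of_nonneg (by omega)]
    rw [hab, hab']
    generalize |(j : Int) - f| = A
    generalize |(j : Int) - l| = B
    generalize |l - (i : Int)| = Li
    generalize |f - (i : Int)| = Fi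
    simp only [Int.min_def]
    split_ifs <;> omega
  unfold innerA
  rw [fold_pyMinO_eq (fun i => PySem.List.pyGetD g (i : Int) 0 +
      min (distA (j : Int) (i : Int) f l) (distA (j : Int) (i : Int) l f)) n]
  simp only [Option.getD_some]
  rw [List.map_congr_left (fun i _ => hF i), pyMinL_map_min, pyMinL_map_add, pyMinL_map_add,
    min_shift]

-- the 26 levels agree given the state relation
theorem levels_eq (s : Nat) (hs : 1 ≤ s) (ch : List Bool) (fa la fb lb : List Int)
    (hrel : ∀ k : Nat, k < 26 →
      (ch.getD k false = false ∧ lb.getD k 0 = -1) ∨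
      (ch.getD k false = true ∧ fa.getD k 0 = fb.getD k 0 ∧ la.getD k 0 = lb.getD k 0 ∧
        0 ≤ fb.getD k 0 ∧ fb.getD k 0 ≤ lb.getD k 0)) :
    ∀ m : Nat, levelsA s ch fa la m = levelsB s fb lb m := by
  intro m
  induction m with
  | zero => rfl
  | succ m ih =>
    simp only [levelsA, levelsB]
    rcases hrel (25 - m) (by omega) with ⟨hc, hl⟩ | ⟨hc, h1, h2, h3, h4⟩
    · rw [hc, hl, ih]
      unfold stepA stepB
      simp
    · rw [hc, h1, h2, ih]
      exact step_eq s hs _ _ h3 h4 _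

theorem getD_replicate_lt {α : Type} (n k : Nat) (a d : α) (h : k < n) :
    (List.replicate n a).getD k d = a := by
  simp [List.getD, List.getElem?_replicate, h]

-- ===== VERDICT (by name: the statement is the Claim_ definition above) =====
theorem solve_spec : Claim_equal_solve := by
  intro S hdom hpre
  obtain ⟨hne, hadmB⟩ := hpre
  have hadm : ∀ c ∈ S.toList, 71 ≤ c.toNat ∧ c.toNat ≤ 122 := by
    intro c hc
    simpa using List.all_eq_true.mp hadmB c hc
  have hs : 1 ≤ S.toList.length :=
    Nat.one_le_iff_ne_zero.mpr (fun h => hne (List.eq_nil_of_length_eq_zero h))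
  have hes : ∀ ic ∈ PySem.List.enumerate S.toList 0, Adm ic.2 := by
    intro ic hic
    rw [PySem.List.mem_enumerate_iff] at hic
    obtain ⟨kk, hkk, rfl⟩ := hic
    exact hadm _ (List.getElem_mem hkk)
  have hA := fun k => scanA_proj (PySem.List.enumerate S.toList 0)
      (List.replicate 26 false, List.replicate 26 50, List.replicate 26 (-1)) hes
      (by simp) (by simp) (by simp) k
  have hB := fun k => scanB_proj (PySem.List.enumerate S.toList 0)
      (List.replicate 26 50, List.replicate 26 (-1)) hes (by simp) (by simp) k
  have hrel : ∀ k : Nat, k < 26 →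
      ((scanA (PySem.List.enumerate S.toList 0)
          (List.replicate 26 false, List.replicate 26 50, List.replicate 26 (-1))).1.getD k false = false ∧
        (scanB (PySem.List.enumerate S.toList 0)
          (List.replicate 26 50, List.replicate 26 (-1))).2.getD k 0 = -1) ∨
      ((scanA (PySem.List.enumerate S.toList 0)
          (List.replicate 26 false, List.replicate 26 50, List.replicate 26 (-1))).1.getD k false = true ∧
        (scanA (PySem.List.enumerate S.toList 0)
          (List.replicate 26 false, List.replicate 26 50, List.replicate 26 (-1))).2.1.getD k 0 =
          (scanB (PySem.List.enumerate S.toList 0)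
            (List.replicate 26 50, List.replicate 26 (-1))).1.getD k 0 ∧
        (scanA (PySem.List.enumerate S.toList 0)
          (List.replicate 26 false, List.replicate 26 50, List.replicate 26 (-1))).2.2.getD k 0 =
          (scanB (PySem.List.enumerate S.toList 0)
            (List.replicate 26 50, List.replicate 26 (-1))).2.getD k 0 ∧
        0 ≤ (scanB (PySem.List.enumerate S.toList 0)
            (List.replicate 26 50, List.replicate 26 (-1))).1.getD k 0 ∧
        (scanB (PySem.List.enumerate S.toList 0)
            (List.replicate 26 50, List.replicate 26 (-1))).1.getD k 0 ≤
          (scanB (PySem.List.enumerate S.toList 0)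
            (List.replicate 26 50, List.replicate 26 (-1))).2.getD k 0) := by
    intro k hk
    have hch := (hA k).2.2.2.1
    have hfa := (hA k).2.2.2.2.1
    have hla := (hA k).2.2.2.2.2
    have hfb := (hB k).2.2.1
    have hlb := (hB k).2.2.2
    rw [getD_replicate_lt _ _ _ _ hk] at hch
    rw [getD_replicate_lt _ _ _ _ hk] at hfa
    rw [getD_replicate_lt _ _ _ _ hk] at hla
    rw [getD_replicate_lt _ _ _ _ hk] at hfb
    rw [getD_replicate_lt _ _ _ _ hk] at hlb
    rw [chfold_any] at hch
    rw [afold_closed k S.toList 0 le_rfl] at hfa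
    rw [afold_closed k S.toList 0 le_rfl] at hfb
    cases hfi : firstIdx (fun c => effN c = k) S.toList with
    | none =>
      left
      constructor
      · rw [hch, any_iff_firstIdx, hfi]; rfl
      · rw [hlb, maxfold_none k S.toList 0 (-1) hfi]
    | some i0 =>
      right
      refine ⟨?_, ?_, ?_, ?_, ?_⟩
      · rw [hch, any_iff_firstIdx, hfi]; rfl
      · rw [hfa, hfb]
      · rw [hla, hlb]
      · rw [hfb, hfi]
        simp only [le_min_iff]
        constructor
        · norm_num
        · positivity
      · rw [hfb, hfi, hlb]
        have hge := maxfold_ge_first k S.toList 0 (-1) i0 hfi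
        simp only [zero_add] at hge ⊢
        exact le_trans (min_le_right _ _) hge
  have hlv := levels_eq S.toList.length hs _ _ _ _ _ hrel 26
  unfold Spec_solve solve solve_alt
  dsimp only
  rw [hlv]
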